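-- pv_equiv track=rewrite | github.com/DRMPN/PythonCode | CS50/ProblemSet6/dna/dna.py | count_tandems
-- ===== SOURCE A (Python) =====
-- def count_tandems(tandem_list, tandem_length):
--
--     # empty list case
--     if not tandem_list:
--         return 0
--
--     count = 1
--     max_count = 1
--
--     for i in range(len(tandem_list) - 1):
--
--         if tandem_list[i] == tandem_list[i+1] - tandem_length:
--             count += 1
--         else:
--             count = 1
--
--         max_count = max(max_count, count)
--
--     return max_count
-- ===== SOURCE B (Python) =====
-- def count_tandems(tandem_list, tandem_length):
--     n = len(tandem_list)
--     if n == 0: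
--         return 0
--     cuts = [-1]
--     cuts += [i for i in range(n - 1)
--              if tandem_list[i + 1] - tandem_list[i] != tandem_length]
--     cuts.append(n - 1)
--     return max(b - a for a, b in zip(cuts, cuts[1:]))
-- ===== Notes on version B (the rewrite author's own statement) =====
-- stated objective: alternative
-- what changed: Instead of A's stateful scan that maintains a running count and running maximum, B collects the break positions (indices whose gap to the next element is not tandem_length), brackets them with -1 and len-1, and returns the maximum difference between consecutive cut positions.
import Mathlib
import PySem

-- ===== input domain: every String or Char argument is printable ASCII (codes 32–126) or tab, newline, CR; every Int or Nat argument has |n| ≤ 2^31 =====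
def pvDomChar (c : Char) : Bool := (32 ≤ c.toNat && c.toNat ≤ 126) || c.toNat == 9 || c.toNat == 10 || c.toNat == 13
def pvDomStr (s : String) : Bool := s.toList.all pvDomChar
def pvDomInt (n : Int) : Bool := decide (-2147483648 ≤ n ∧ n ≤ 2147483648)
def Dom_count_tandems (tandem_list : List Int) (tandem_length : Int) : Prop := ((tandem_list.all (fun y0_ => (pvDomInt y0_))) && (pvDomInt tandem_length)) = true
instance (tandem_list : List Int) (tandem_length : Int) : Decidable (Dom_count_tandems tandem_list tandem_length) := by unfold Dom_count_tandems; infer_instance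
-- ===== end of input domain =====

-- B replaces A's running count/max scan by a different decomposition: it collects the break
-- positions (indices whose gap is not tandem_length) and returns the largest difference between
-- consecutive cut positions (objective: alternative; same linear cost).

-- ===== PORT A =====
-- Raw indexing tandem_list[i] / tandem_list[i+1] is always in range here (i < len - 1),
-- so pyGetD is exact on every input.
def count_tandems (tandem_list : List Int) (tandem_length : Int) : Int :=
  if tandem_list = [] then 0
  else
    ((PySem.List.pyRange 0 ((tandem_list.length : Int) - 1) 1).foldl
      (fun (s : Int × Int) i =>
        let count : Int :=
          if PySem.List.pyGetD tandem_list i 0 = PySem.List.pyGetD tandem_list (i + 1) 0 - tandem_length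
          then s.1 + 1 else 1
        (count, max s.2 count))
      (1, 1)).2

-- ===== PORT B =====
-- Raw indexing is always in range as in A; Python's max(...) over the diff list is ported as
-- PySem.List.max?, which is `some` there because cuts always has at least two elements, so
-- `.getD 0` is exact.
def count_tandems_alt (tandem_list : List Int) (tandem_length : Int) : Int :=
  let n : Int := (tandem_list.length : Int)
  if n = 0 then 0
  else
    let cuts : List Int :=
      -1 :: ((PySem.List.pyRange 0 (n - 1) 1).filter
        (fun i => PySem.List.pyGetD tandem_list (i + 1) 0 - PySem.List.pyGetD tandem_list i 0 != tandem_length))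
        ++ [n - 1]
    (PySem.List.max? ((cuts.zip cuts.tail).map (fun p => p.2 - p.1)) (fun y => y)).getD 0

-- ===== PRECONDITION & SPEC =====
def Spec_count_tandems (tandem_list : List Int) (tandem_length : Int) (out : Int) : Prop := out = count_tandems_alt tandem_list tandem_length
instance (tandem_list : List Int) (tandem_length : Int) (out : Int) : Decidable (Spec_count_tandems tandem_list tandem_length out) := by unfold Spec_count_tandems; infer_instance

-- ===== CLAIM (what is proved, stated in full; the proofs are below) =====
def Claim_equal_count_tandems : Prop := ∀ (tandem_list : List Int) (tandem_length : Int), Dom_count_tandems tandem_list tandem_length → Spec_count_tandems tandem_list tandem_length (count_tandems tandem_list tandem_length)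

-- ===== LEMMAS AND PROOFS =====

def pvStepA (t : Int) (s : Int × Int) (z : Int × Int) : Int × Int :=
  if z.1 = z.2 - t then (s.1 + 1, max s.2 (s.1 + 1)) else (1, max s.2 1)

structure PvSt where
  hr : Int
  tl : Int
  best : Int
  am : Bool
deriving Repr, DecidableEq

def pvStats (t : Int) : List (Int × Int) → PvSt
  | [] => ⟨0, 0, 0, true⟩
  | z :: zs =>
    let s := pvStats t zs
    if z.1 = z.2 - t then
      ⟨s.hr + 1, if s.am then (zs.length : Int) + 1 else s.tl, max (s.hr + 1) s.best, s.am⟩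
    else
      ⟨0, if s.am then (zs.length : Int) else s.tl, s.best, false⟩

lemma pvStats_bounds (t : Int) (zs : List (Int × Int)) :
    0 ≤ (pvStats t zs).hr ∧ (pvStats t zs).hr ≤ (pvStats t zs).best ∧
    0 ≤ (pvStats t zs).tl ∧ (pvStats t zs).best ≤ (zs.length : Int) ∧
    ((pvStats t zs).am = true → (pvStats t zs).hr = (zs.length : Int)) := by
  induction zs with
  | nil => simp [pvStats]
  | cons z zs ih =>
    obtain ⟨h1, h2, h3, h4, h5⟩ := ih
    simp only [pvStats, List.length_cons]
    by_cases h : z.1 = z.2 - t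
    · rw [if_pos h]; dsimp only; push_cast
      refine ⟨by omega, by omega, ?_, by omega, ?_⟩
      · split_ifs <;> omega
      · intro ham; have := h5 ham; omega
    · rw [if_neg h]; dsimp only; push_cast
      refine ⟨trivial, by omega, ?_, by omega, fun hf => hf.elim⟩
      split_ifs <;> omega

def pvPos (t : Int) : List (Int × Int) → Int → List Int
  | [], _ => []
  | z :: zs, k => if z.1 = z.2 - t then pvPos t zs (k + 1) else k :: pvPos t zs (k + 1)

def pvDiffs (prev : Int) : List Int → List Int
  | [] => []
  | x :: xs => (x - prev) :: pvDiffs x xs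

lemma pv_zip_diffs (L : List Int) : ∀ (prev : Int),
    (((prev :: L).zip (prev :: L).tail).map (fun p => p.2 - p.1)) = pvDiffs prev L := by
  induction L with
  | nil => intro prev; simp [pvDiffs]
  | cons x xs ih =>
    intro prev
    have h := ih x
    simp only [List.tail_cons] at h
    simp only [List.tail_cons, List.zip_cons_cons, List.map_cons, pvDiffs]
    rw [h]

lemma pv_pair_getD (l : List Int) (i : Int) (h0 : 0 ≤ i) (h : i < ((l.zip l.tail).length : Int)) :
    PySem.List.pyGetD (l.zip l.tail) i (0, 0) =
      (PySem.List.pyGetD l i 0, PySem.List.pyGetD l (i + 1) 0) := by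
  have hlen : (l.zip l.tail).length = min l.length l.tail.length := List.length_zip
  have hlt : l.tail.length = l.length - 1 := List.length_tail
  rw [PySem.List.pyGetD_eq_getElem _ (0, 0) h0 h,
      PySem.List.pyGetD_eq_getElem _ 0 h0 (by omega),
      PySem.List.pyGetD_eq_getElem _ 0 (by omega) (by omega)]
  rw [List.getElem_zip]
  have hn : (i + 1).toNat = i.toNat + 1 := by omega
  simp [List.getElem_tail, hn]

lemma pv_getD_cons_pos {α : Type} (z : α) (zs : List α) (i : Int) (d : α) (h : 1 ≤ i) :
    PySem.List.pyGetD (z :: zs) i d = PySem.List.pyGetD zs (i - 1) d := by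
  have h1 : i = ((i.toNat : Int)) := by omega
  rw [h1]
  have h2 : (i.toNat : Int) - 1 = ((i.toNat - 1 : Nat) : Int) := by omega
  rw [h2, PySem.List.pyGetD_natCast, PySem.List.pyGetD_natCast]
  obtain ⟨m, hm⟩ : ∃ m, i.toNat = m + 1 := ⟨i.toNat - 1, by omega⟩
  rw [hm]
  simp [List.getD]

lemma pv_filter_pos (t : Int) (zs : List (Int × Int)) : ∀ (k : Int), 0 ≤ k →
    (PySem.List.pyRange k (k + (zs.length : Int)) 1).filter
      (fun i => !(decide ((PySem.List.pyGetD zs (i - k) (0, 0)).1 =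
                          (PySem.List.pyGetD zs (i - k) (0, 0)).2 - t)))
      = pvPos t zs k := by
  induction zs with
  | nil => intro k hk; simp [pvPos, PySem.List.pyRange_one_eq_nil]
  | cons z zs ih =>
    intro k hk
    have hcons : PySem.List.pyRange k (k + ((z :: zs).length : Int)) 1
        = k :: PySem.List.pyRange (k + 1) (k + ((z :: zs).length : Int)) 1 := by
      apply PySem.List.pyRange_one_cons
      simp only [List.length_cons]; push_cast; omega
    rw [hcons]
    have harg : k + ((z :: zs).length : Int) = (k + 1) + (zs.length : Int) := by
      simp only [List.length_cons]; push_cast; omega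
    have hsh : (PySem.List.pyRange (k + 1) (k + ((z :: zs).length : Int)) 1).filter
        (fun i => !(decide ((PySem.List.pyGetD (z :: zs) (i - k) (0, 0)).1 =
                            (PySem.List.pyGetD (z :: zs) (i - k) (0, 0)).2 - t)))
        = (PySem.List.pyRange (k + 1) ((k + 1) + (zs.length : Int)) 1).filter
        (fun i => !(decide ((PySem.List.pyGetD zs (i - (k + 1)) (0, 0)).1 =
                            (PySem.List.pyGetD zs (i - (k + 1)) (0, 0)).2 - t))) := by
      rw [harg]
      apply List.filter_congr
      intro i hi
      rw [PySem.List.mem_pyRange_one] at hi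
      rw [pv_getD_cons_pos z zs (i - k) (0, 0) (by omega)]
      have he : i - k - 1 = i - (k + 1) := by omega
      rw [he]
    rw [List.filter_cons, hsh, ih (k + 1) (by omega)]
    have hk0 : PySem.List.pyGetD (z :: zs) (k - k) (0, 0) = z := by
      have he : k - k = (0 : Int) := by omega
      rw [he, PySem.List.pyGetD_zero_cons]
    rw [hk0]
    simp only [pvPos]
    by_cases h : z.1 = z.2 - t <;> simp [h]

lemma pv_foldA (t : Int) (zs : List (Int × Int)) : ∀ (c m : Int), 1 ≤ c → c ≤ m →
    zs.foldl (pvStepA t) (c, m)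
    = ((if (pvStats t zs).am then c + (zs.length : Int) else 1 + (pvStats t zs).tl),
       max m (max (c + (pvStats t zs).hr) (1 + (pvStats t zs).best))) := by
  induction zs with
  | nil =>
    intro c m h1 h2
    simp [pvStats]
    omega
  | cons z zs ih =>
    intro c m h1 h2
    obtain ⟨b1, b2, b3, b4, b5⟩ := pvStats_bounds t zs
    simp only [List.foldl_cons, pvStats, pvStepA, List.length_cons]
    by_cases h : z.1 = z.2 - t
    · simp only [if_pos h]
      rw [ih (c + 1) (max m (c + 1)) (by omega) (by omega)]
      simp only [Prod.mk.injEq]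
      constructor
      · split_ifs with ham <;> push_cast <;> omega
      · omega
    · simp only [if_neg h]
      rw [ih 1 (max m 1) (by omega) (by omega)]
      simp only [Prod.mk.injEq, Bool.false_eq_true, if_false]
      constructor
      · split_ifs with ham <;> omega
      · omega

lemma pv_max_cons (x : Int) (ys : List Int) (v : Int)
    (h : PySem.List.max? ys (fun y => y) = some v) :
    PySem.List.max? (x :: ys) (fun y => y) = some (max x v) := by
  cases ys with
  | nil =>
    have hn : PySem.List.max? ([] : List Int) (fun y => y) = none :=
      (PySem.List.max?_eq_none_iff _ _).mpr rfl
    rw [hn] at h; cases h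
  | cons y t =>
    rw [PySem.List.max?_id_cons] at h ⊢
    have hfold : ∀ (l : List Int) (a b : Int), l.foldl max (max a b) = max a (l.foldl max b) := by
      intro l
      induction l with
      | nil => intro a b; simp
      | cons c l ihl => intro a b; simp only [List.foldl_cons, max_assoc]; exact ihl a (max b c)
    simp only [List.foldl_cons]
    rw [hfold t x y]
    simp only [Option.some.injEq] at h ⊢
    omega

lemma pv_maxdiff (t : Int) (zs : List (Int × Int)) : ∀ (k prev : Int), prev < k →
    PySem.List.max? (pvDiffs prev (pvPos t zs k ++ [k + (zs.length : Int)])) (fun y => y)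
    = some (max ((k - prev) + (pvStats t zs).hr) (1 + (pvStats t zs).best)) := by
  induction zs with
  | nil =>
    intro k prev h
    simp [pvPos, pvStats, pvDiffs, PySem.List.max?_id_cons]
    omega
  | cons z zs ih =>
    intro k prev h
    obtain ⟨b1, b2, b3, b4, b5⟩ := pvStats_bounds t zs
    have harg : k + ((z :: zs).length : Int) = (k + 1) + (zs.length : Int) := by
      simp only [List.length_cons]; push_cast; omega
    simp only [pvPos, pvStats, harg]
    by_cases hm : z.1 = z.2 - t
    · simp only [if_pos hm]
      rw [ih (k + 1) prev (by omega)]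
      simp only [Option.some.injEq]
      omega
    · simp only [if_neg hm, List.cons_append, pvDiffs]
      rw [pv_max_cons _ _ _ (ih (k + 1) k (by omega))]
      simp only [Option.some.injEq]
      omega

lemma pv_main (l : List Int) (t : Int) : count_tandems l t = count_tandems_alt l t := by
  by_cases hl : l = []
  · subst hl; simp [count_tandems, count_tandems_alt]
  · have hpos : 0 < l.length := List.length_pos_of_ne_nil hl
    have hzlen : (l.zip l.tail).length = min l.length l.tail.length := List.length_zip
    have htl : l.tail.length = l.length - 1 := List.length_tail
    have hb : (l.length : Int) - 1 = ((l.zip l.tail).length : Int) := by omega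
    obtain ⟨b1, b2, b3, b4, b5⟩ := pvStats_bounds t (l.zip l.tail)
    -- A side
    have hA : count_tandems l t
        = max 1 (max (1 + (pvStats t (l.zip l.tail)).hr) (1 + (pvStats t (l.zip l.tail)).best)) := by
      unfold count_tandems
      rw [if_neg hl, hb]
      have hcong : (PySem.List.pyRange 0 (((l.zip l.tail).length : Int)) 1).foldl
          (fun (s : Int × Int) i =>
            let count : Int :=
              if PySem.List.pyGetD l i 0 = PySem.List.pyGetD l (i + 1) 0 - t
              then s.1 + 1 else 1
            (count, max s.2 count)) (1, 1)
          = (PySem.List.pyRange 0 (((l.zip l.tail).length : Int)) 1).foldl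
            (fun s i => pvStepA t s (PySem.List.pyGetD (l.zip l.tail) i (0, 0))) (1, 1) := by
        apply PySem.List.foldl_congr_mem
        intro acc i hi
        rw [PySem.List.mem_pyRange_one] at hi
        rw [pv_pair_getD l i hi.1 hi.2]
        by_cases hc : PySem.List.pyGetD l i 0 = PySem.List.pyGetD l (i + 1) 0 - t <;>
          simp [pvStepA, hc]
      rw [hcong, PySem.List.foldl_pyRange_zero_pyGetD' (l.zip l.tail) (0, 0) (pvStepA t) (1, 1)]
      rw [pv_foldA t (l.zip l.tail) 1 1 le_rfl le_rfl]
    -- B side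
    have hn0 : (l.length : Int) ≠ 0 := by omega
    have hfilter : (PySem.List.pyRange 0 ((l.length : Int) - 1) 1).filter
        (fun i => PySem.List.pyGetD l (i + 1) 0 - PySem.List.pyGetD l i 0 != t)
        = pvPos t (l.zip l.tail) 0 := by
      have h0 := pv_filter_pos t (l.zip l.tail) 0 le_rfl
      simp only [zero_add, sub_zero] at h0
      rw [hb, ← h0]
      apply List.filter_congr
      intro i hi
      rw [PySem.List.mem_pyRange_one] at hi
      rw [pv_pair_getD l i hi.1 hi.2]
      by_cases hc : PySem.List.pyGetD l i 0 = PySem.List.pyGetD l (i + 1) 0 - t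
      · have hx : PySem.List.pyGetD l (i + 1) 0 - PySem.List.pyGetD l i 0 = t := by omega
        simp [hc]
      · have hx : PySem.List.pyGetD l (i + 1) 0 - PySem.List.pyGetD l i 0 ≠ t := by omega
        simp [hc, hx]
    have hB : count_tandems_alt l t
        = max (0 - (-1) + (pvStats t (l.zip l.tail)).hr) (1 + (pvStats t (l.zip l.tail)).best) := by
      unfold count_tandems_alt
      simp only [if_neg hn0]
      rw [hfilter, hb]
      simp only [List.cons_append]
      rw [pv_zip_diffs]
      have hmd := pv_maxdiff t (l.zip l.tail) 0 (-1) (by omega)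
      simp only [zero_add] at hmd
      rw [hmd]
      simp only [Option.getD_some]
    rw [hA, hB]
    omega

-- ===== VERDICT (by name: the statement is the Claim_ definition above) =====
theorem count_tandems_spec : Claim_equal_count_tandems := by
  intro tandem_list tandem_length _hdom
  unfold Spec_count_tandems
  exact pv_main tandem_list tandem_length
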